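-- pv_equiv track=rewrite | github.com/MartinCampbell1/quorum | orchestrator/modes/democracy.py | _vote_summary
-- ===== SOURCE A (Python) =====
-- from collections import Counter
--
-- def _normalize_position(position: str) -> str:
--     return " ".join(position.split()).strip().lower()
--
-- def _vote_summary(votes: list[dict]) -> tuple[Counter, dict[str, str], dict[str, int]]:
--     counts: Counter = Counter()
--     representatives: dict[str, str] = {}
--     first_seen: dict[str, int] = {}
--
--     for idx, vote in enumerate(votes):
--         raw_position = str(vote.get("position", "")).strip()
--         if not raw_position:
--             continue
--         key = _normalize_position(raw_position)
--         counts[key] += 1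
--         representatives.setdefault(key, raw_position)
--         first_seen.setdefault(key, idx)
--
--     return counts, representatives, first_seen
-- ===== SOURCE B (Python) =====
-- from collections import Counter
--
--
-- def _normalize_position(position: str) -> str:
--     return " ".join(position.split()).strip().lower()
--
--
-- def _vote_summary(votes: list[dict]) -> tuple[Counter, dict[str, str], dict[str, int]]:
--     # One grouped index: normalized key -> ordered list of (idx, raw_position).
--     groups: dict[str, list] = {}
--     for idx, vote in enumerate(votes):
--         raw_position = str(vote.get("position", "")).strip()
--         if raw_position:
--             groups.setdefault(_normalize_position(raw_position), []).append((idx, raw_position))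
--     counts = Counter({k: len(occ) for k, occ in groups.items()})
--     representatives = {k: occ[0][1] for k, occ in groups.items()}
--     first_seen = {k: occ[0][0] for k, occ in groups.items()}
--     return counts, representatives, first_seen
-- ===== Notes on version B (the rewrite author's own statement) =====
-- stated objective: alternative
-- what changed: B builds a single grouped index mapping each normalized key to its ordered (idx, raw_position) occurrences in one pass, then derives counts, representatives and first_seen from that index, instead of A's three parallel running dicts updated inside the loop.
import Mathlib
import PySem

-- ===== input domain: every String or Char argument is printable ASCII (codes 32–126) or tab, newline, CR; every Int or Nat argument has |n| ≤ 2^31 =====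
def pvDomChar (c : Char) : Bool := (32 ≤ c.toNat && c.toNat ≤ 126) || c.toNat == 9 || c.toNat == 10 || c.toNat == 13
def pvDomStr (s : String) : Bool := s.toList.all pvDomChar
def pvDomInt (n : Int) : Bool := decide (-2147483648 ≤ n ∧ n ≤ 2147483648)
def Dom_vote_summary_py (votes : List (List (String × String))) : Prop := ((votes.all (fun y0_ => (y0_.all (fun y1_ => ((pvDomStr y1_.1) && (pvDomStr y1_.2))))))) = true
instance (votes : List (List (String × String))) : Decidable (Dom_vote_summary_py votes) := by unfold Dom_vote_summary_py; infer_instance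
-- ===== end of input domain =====

-- B replaces A's three parallel running dicts by one grouped occurrence index that is
-- reduced afterwards (objective: alternative); return values proved equal on all inputs.

-- shared helpers (both Pythons call _normalize_position and the same vote.get/strip expression)
def pvNorm (s : String) : String :=
  PySem.Str.lower (PySem.Str.strip (PySem.Str.join " " (PySem.Str.split₀ s)))

-- str(vote.get("position", "")).strip(); values are strings, str() is the identity
def pvRawPos (vote : List (String × String)) : String :=
  PySem.Str.strip ((PySem.Dict.mk vote).getD "position" "")

-- ===== PORT A =====
def vote_summary_py (votes : List (List (String × String))) : (List (String × Int)) × (List (String × String)) × (List (String × Int)) :=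
  let st :=
    (PySem.List.enumerate votes).foldl
      (fun (st : PySem.Dict String Int × PySem.Dict String String × PySem.Dict String Int) iv =>
        let raw := pvRawPos iv.2
        if raw = "" then st
        else
          let key := pvNorm raw
          (st.1.modify key 0 (· + 1), st.2.1.setdefault key raw, st.2.2.setdefault key iv.1))
      (PySem.Dict.empty, PySem.Dict.empty, PySem.Dict.empty)
  (st.1.items, st.2.1.items, st.2.2.items)

-- ===== PORT B =====
def vote_summary_py_alt (votes : List (List (String × String))) : (List (String × Int)) × (List (String × String)) × (List (String × Int)) :=
  let groups : PySem.Dict String (List (Int × String)) :=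
    (PySem.List.enumerate votes).foldl
      (fun g iv =>
        let raw := pvRawPos iv.2
        if raw = "" then g
        else g.modify (pvNorm raw) [] (· ++ [(iv.1, raw)]))
      PySem.Dict.empty
  -- occ[0]: every stored occurrence list is nonempty, so headD is exact here
  (groups.items.map (fun p => (p.1, (p.2.length : Int))),
   groups.items.map (fun p => (p.1, (p.2.headD (0, "")).2)),
   groups.items.map (fun p => (p.1, (p.2.headD (0, "")).1)))

-- ===== PRECONDITION & SPEC =====
def Spec_vote_summary_py (votes : List (List (String × String))) (out : (List (String × Int)) × (List (String × String)) × (List (String × Int))) : Prop := out = vote_summary_py_alt votes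
instance (votes : List (List (String × String))) (out : (List (String × Int)) × (List (String × String)) × (List (String × Int))) : Decidable (Spec_vote_summary_py votes out) := by unfold Spec_vote_summary_py; infer_instance

-- ===== CLAIM (what is proved, stated in full; the proofs are below) =====
def Claim_equal_vote_summary_py : Prop := ∀ (votes : List (List (String × String))), Dom_vote_summary_py votes → Spec_vote_summary_py votes (vote_summary_py votes)

-- ===== LEMMAS AND PROOFS =====

-- "c mirrors g through F": c's items are g's items with values transformed by F
def pvMirror {ν μ : Type} (F : ν → μ) (g : PySem.Dict String ν) (c : PySem.Dict String μ) : Prop :=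
  c.items = g.items.map (fun p => (p.1, F p.2))

theorem pv_get?_mirror {ν μ : Type} (F : ν → μ) (g : PySem.Dict String ν) (c : PySem.Dict String μ)
    (hc : pvMirror F g c) (k : String) : c.get? k = (g.get? k).map F := by
  unfold pvMirror at hc
  simp [PySem.Dict.get?, hc, List.find?_map, Function.comp_def]

theorem pv_contains_mirror {ν μ : Type} (F : ν → μ) (g : PySem.Dict String ν) (c : PySem.Dict String μ)
    (hc : pvMirror F g c) (k : String) : c.contains k = g.contains k := by
  unfold pvMirror at hc
  simp [PySem.Dict.contains, hc, List.any_map, Function.comp_def]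

theorem pv_insert_mirror {ν μ : Type} (F : ν → μ) (g : PySem.Dict String ν) (c : PySem.Dict String μ)
    (hc : pvMirror F g c) (k : String) (w : ν) :
    pvMirror F (g.insert k w) (c.insert k (F w)) := by
  have hcon := pv_contains_mirror F g c hc k
  unfold pvMirror at hc ⊢
  unfold PySem.Dict.insert
  rw [hcon]
  by_cases h : g.contains k = true
  · simp only [h, if_pos]
    rw [hc, List.map_map, List.map_map]
    apply List.map_congr_left
    intro p _
    by_cases hk : p.1 = k <;> simp [hk]
  · simp [h, hc]

theorem pv_headD_append_of_ne_nil {α : Type} (vs : List α) (x d : α) (h : vs ≠ []) :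
    (vs ++ [x]).headD d = vs.headD d := by
  cases vs with
  | nil => exact absurd rfl h
  | cons a t => simp

-- the combined invariant of the two loops
def pvInv (g : PySem.Dict String (List (Int × String)))
    (c : PySem.Dict String Int) (r : PySem.Dict String String) (f : PySem.Dict String Int) : Prop :=
  pvMirror (fun occ => (occ.length : Int)) g c ∧
  pvMirror (fun occ => (occ.headD (0, "")).2) g r ∧
  pvMirror (fun occ => (occ.headD (0, "")).1) g f ∧
  (∀ p ∈ g.items, p.2 ≠ []) ∧ g.keys.Nodup

theorem pv_step (g : PySem.Dict String (List (Int × String)))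
    (c : PySem.Dict String Int) (r : PySem.Dict String String) (f : PySem.Dict String Int)
    (hinv : pvInv g c r f) (k : String) (i : Int) (raw : String) :
    pvInv (g.modify k [] (· ++ [(i, raw)]))
      (c.modify k 0 (· + 1)) (r.setdefault k raw) (f.setdefault k i) := by
  obtain ⟨hc, hr, hf, hne, hnd⟩ := hinv
  have hw : g.modify k [] (· ++ [(i, raw)]) = g.insert k (g.getD k [] ++ [(i, raw)]) := rfl
  set w : List (Int × String) := g.getD k [] ++ [(i, raw)] with hwdef
  have hwne : w ≠ [] := by simp [hwdef]
  refine ⟨?_, ?_, ?_, ?_, ?_⟩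
  · -- counts
    rw [hw]
    have hgetD : c.getD k 0 = ((g.getD k []).length : Int) := by
      unfold PySem.Dict.getD
      rw [pv_get?_mirror _ g c hc k]
      cases g.get? k <;> simp
    have : c.modify k 0 (· + 1) = c.insert k ((w.length : Int)) := by
      unfold PySem.Dict.modify
      rw [hgetD, hwdef]
      simp
    rw [this]
    exact pv_insert_mirror _ g c hc k w
  · -- representatives
    rw [hw]
    unfold PySem.Dict.setdefault
    rw [pv_contains_mirror _ g r hr k]
    by_cases hcon : g.contains k = true
    · simp only [hcon, if_pos]
      unfold pvMirror at hr ⊢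
      rw [PySem.Dict.items_insert_of_contains g _ hcon, hr, List.map_map]
      apply List.map_congr_left
      intro p hp
      by_cases hk : p.1 == k
      · have hk' : p.1 = k := by exact eq_of_beq hk
        have hpv : g.getD k [] = p.2 := by
          have : (k, p.2) ∈ g.items := by rw [← hk']; exact hp
          exact PySem.Dict.getD_of_mem_items g this hnd []
        have hpne : p.2 ≠ [] := hne p hp
        simp only [Function.comp, hk, if_pos]
        rw [hwdef, hpv, pv_headD_append_of_ne_nil _ _ _ hpne, hk']
      · simp [Function.comp, hk]
    · have hrcon : r.contains k = true ↔ g.contains k = true := by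
        rw [pv_contains_mirror _ g r hr k]
      simp only [hcon, if_neg, Bool.not_eq_true]
      unfold pvMirror at hr ⊢
      rw [PySem.Dict.items_insert_of_not_contains g _ (by simpa using hcon)]
      have hget : g.getD k [] = [] := PySem.Dict.getD_of_not_contains g [] (by simpa using hcon)
      simp [hr, hwdef, hget]
  · -- first_seen
    rw [hw]
    unfold PySem.Dict.setdefault
    rw [pv_contains_mirror _ g f hf k]
    by_cases hcon : g.contains k = true
    · simp only [hcon, if_pos]
      unfold pvMirror at hf ⊢
      rw [PySem.Dict.items_insert_of_contains g _ hcon, hf, List.map_map]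
      apply List.map_congr_left
      intro p hp
      by_cases hk : p.1 == k
      · have hk' : p.1 = k := by exact eq_of_beq hk
        have hpv : g.getD k [] = p.2 := by
          have : (k, p.2) ∈ g.items := by rw [← hk']; exact hp
          exact PySem.Dict.getD_of_mem_items g this hnd []
        have hpne : p.2 ≠ [] := hne p hp
        simp only [Function.comp, hk, if_pos]
        rw [hwdef, hpv, pv_headD_append_of_ne_nil _ _ _ hpne, hk']
      · simp [Function.comp, hk]
    · simp only [hcon, if_neg, Bool.not_eq_true]
      unfold pvMirror at hf ⊢
      rw [PySem.Dict.items_insert_of_not_contains g _ (by simpa using hcon)]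
      have hget : g.getD k [] = [] := PySem.Dict.getD_of_not_contains g [] (by simpa using hcon)
      simp [hf, hwdef, hget]
  · -- nonempty values
    rw [hw]
    intro p hp
    rcases (PySem.Dict.mem_items_insert g k w p).mp hp with h | h
    · rw [h]; exact hwne
    · exact hne p h.1
  · -- nodup keys
    rw [hw]
    exact PySem.Dict.nodup_keys_insert g k w hnd

theorem pv_main (l : List (Int × List (String × String)))
    (g : PySem.Dict String (List (Int × String)))
    (c : PySem.Dict String Int) (r : PySem.Dict String String) (f : PySem.Dict String Int)
    (hinv : pvInv g c r f) :
    pvInv (l.foldl (fun g iv =>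
        let raw := pvRawPos iv.2
        if raw = "" then g else g.modify (pvNorm raw) [] (· ++ [(iv.1, raw)])) g)
      ((l.foldl (fun st iv =>
        let raw := pvRawPos iv.2
        if raw = "" then st
        else
          let key := pvNorm raw
          (st.1.modify key 0 (· + 1), st.2.1.setdefault key raw, st.2.2.setdefault key iv.1))
        (c, r, f)).1)
      ((l.foldl (fun st iv =>
        let raw := pvRawPos iv.2
        if raw = "" then st
        else
          let key := pvNorm raw
          (st.1.modify key 0 (· + 1), st.2.1.setdefault key raw, st.2.2.setdefault key iv.1))
        (c, r, f)).2.1)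
      ((l.foldl (fun st iv =>
        let raw := pvRawPos iv.2
        if raw = "" then st
        else
          let key := pvNorm raw
          (st.1.modify key 0 (· + 1), st.2.1.setdefault key raw, st.2.2.setdefault key iv.1))
        (c, r, f)).2.2) := by
  induction l generalizing g c r f with
  | nil => exact hinv
  | cons iv t ih =>
      simp only [List.foldl_cons]
      by_cases hraw : pvRawPos iv.2 = ""
      · simp only [hraw, if_pos]
        exact ih g c r f hinv
      · simp only [hraw, if_neg, reduceIte]
        exact ih _ _ _ _ (pv_step g c r f hinv (pvNorm (pvRawPos iv.2)) iv.1 (pvRawPos iv.2))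

-- ===== VERDICT (by name: the statement is the Claim_ definition above) =====
theorem vote_summary_py_spec : Claim_equal_vote_summary_py := by
  intro votes _
  unfold Spec_vote_summary_py vote_summary_py vote_summary_py_alt
  have hinit : pvInv PySem.Dict.empty PySem.Dict.empty PySem.Dict.empty PySem.Dict.empty :=
    ⟨rfl, rfl, rfl, by intro p hp; simp [PySem.Dict.empty] at hp, by simp [PySem.Dict.empty, PySem.Dict.keys]⟩
  obtain ⟨hc, hr, hf, -, -⟩ :=
    pv_main (PySem.List.enumerate votes) PySem.Dict.empty PySem.Dict.empty PySem.Dict.empty PySem.Dict.empty hinit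
  unfold pvMirror at hc hr hf
  simp only []
  exact Prod.ext hc (Prod.ext hr hf)
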